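-- pv_equiv track=rewrite | github.com/LimJih00n/coding-test-practice_jihoon | 백준12100.py | gen_h
-- ===== SOURCE A (Python) =====
-- def gen_h(elements, r):
--
--     re = []
--
--     def dfs(path):
--         if len (path) == r:
--             re.append(path[:])
--             return
--         for i in range(len(elements)):
--             path.append(elements[i])
--             dfs(path)
--             path.pop()
--     dfs([])
--     return re
-- ===== SOURCE B (Python) =====
-- def gen_h(elements, r):
--     result = [[]]
--     for _ in range(r):
--         result = [seq + [e] for seq in result for e in elements]
--     return result
-- ===== Notes on version B (the rewrite author's own statement) =====
-- stated objective: alternative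
-- what changed: Replaces the recursive backtracking DFS over a single mutable path with an iterative breadth-first product: result starts as [[]] and is extended level by level with one comprehension per slot.
-- outside the precondition, e.g. on gen_h([], -1): A returns [], B returns [[]]
import Mathlib
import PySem

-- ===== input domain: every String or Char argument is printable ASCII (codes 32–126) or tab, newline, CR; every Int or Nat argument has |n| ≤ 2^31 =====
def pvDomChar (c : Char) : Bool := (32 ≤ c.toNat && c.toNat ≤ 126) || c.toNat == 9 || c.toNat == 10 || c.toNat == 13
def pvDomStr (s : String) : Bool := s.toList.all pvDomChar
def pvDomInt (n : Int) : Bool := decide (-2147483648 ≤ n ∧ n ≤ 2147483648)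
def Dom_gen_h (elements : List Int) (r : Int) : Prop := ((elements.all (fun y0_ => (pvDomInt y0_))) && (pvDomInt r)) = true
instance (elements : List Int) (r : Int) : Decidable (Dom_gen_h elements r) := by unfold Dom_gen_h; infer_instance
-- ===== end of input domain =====

-- B replaces A's recursive backtracking DFS by an iterative level-by-level product; equal output on r ≥ 0.

-- ===== PORT A =====
-- A's dfs: recursion depth is bounded by r for r ≥ 0, so fuel r.toNat - path.length is exact there
-- (for r < 0 with nonempty elements the Python recurses forever; excluded by Pre_).
def dfsA (elements : List Int) (r : Int) (fuel : Nat) (path : List Int) (re : List (List Int)) : List (List Int) :=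
  if (path.length : Int) = r then re ++ [path]
  else
    match fuel with
    | 0 => re
    | Nat.succ f => elements.foldl (fun acc e => dfsA elements r f (path ++ [e]) acc) re

def gen_h (elements : List Int) (r : Int) : List (List Int) :=
  dfsA elements r r.toNat [] []

-- ===== PORT B =====
def gen_h_alt (elements : List Int) (r : Int) : List (List Int) :=
  (PySem.List.pyRange 0 r 1).foldl
    (fun result _ => result.flatMap (fun seq => elements.map (fun e => seq ++ [e]))) [[]]

-- ===== PRECONDITION & SPEC =====
-- Pre_ excludes negative r: there A either recurses forever (RecursionError, nonempty elements)
-- or returns [] only because the base case is unreachable ([], r<0), while B naturally yields [[]].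
def Pre_gen_h (elements : List Int) (r : Int) : Prop := 0 ≤ r
instance (elements : List Int) (r : Int) : Decidable (Pre_gen_h elements r) := by unfold Pre_gen_h; infer_instance
def pvWitness_gen_h : List Int × Int := ([1, 2], 2)

def Spec_gen_h (elements : List Int) (r : Int) (out : List (List Int)) : Prop := out = gen_h_alt elements r
instance (elements : List Int) (r : Int) (out : List (List Int)) : Decidable (Spec_gen_h elements r out) := by unfold Spec_gen_h; infer_instance

-- ===== CLAIM (what is proved, stated in full; the proofs are below) =====
def Claim_equal_gen_h : Prop := ∀ (elements : List Int) (r : Int), Dom_gen_h elements r → Pre_gen_h elements r → Spec_gen_h elements r (gen_h elements r)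

-- ===== LEMMAS AND PROOFS =====

-- depth-first tuples of length k (the order A emits them)
def tupT (elements : List Int) : Nat → List (List Int)
  | 0 => [[]]
  | Nat.succ k => elements.flatMap (fun e => (tupT elements k).map (fun t => e :: t))

-- one breadth-first step of B
def stepB (elements : List Int) (L : List (List Int)) : List (List Int) :=
  L.flatMap (fun seq => elements.map (fun e => seq ++ [e]))

theorem foldl_app (elements : List Int) (g : Int → List (List Int)) :
    ∀ (re : List (List Int)),
      elements.foldl (fun acc e => acc ++ g e) re = re ++ elements.flatMap g := by
  induction elements with
  | nil => intro re; simp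
  | cons x xs ih => intro re; simp [List.foldl_cons, ih, List.append_assoc]

theorem dfsA_eq (elements : List Int) (r : Int) :
    ∀ (k : Nat) (path : List Int) (re : List (List Int)),
      (path.length : Int) + k = r →
      dfsA elements r k path re = re ++ (tupT elements k).map (fun t => path ++ t) := by
  intro k
  induction k with
  | zero =>
    intro path re h
    simp at h
    simp [dfsA, h, tupT]
  | succ k ih =>
    intro path re h
    have hne : ¬ ((path.length : Int) = r) := by omega
    rw [dfsA]
    simp only [hne, if_false]
    have : ∀ acc e, dfsA elements r k (path ++ [e]) acc
        = acc ++ (tupT elements k).map (fun t => (path ++ [e]) ++ t) := by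
      intro acc e
      apply ih
      simp
      omega
    have hfun : (fun acc e => dfsA elements r k (path ++ [e]) acc)
        = fun (acc : List (List Int)) (e : Int) => acc ++ (tupT elements k).map (fun t => (path ++ [e]) ++ t) := by
      funext acc e; exact this acc e
    calc elements.foldl (fun acc e => dfsA elements r k (path ++ [e]) acc) re
        = elements.foldl (fun acc e => acc ++ (tupT elements k).map (fun t => (path ++ [e]) ++ t)) re := by
          rw [hfun]
      _ = re ++ elements.flatMap (fun e => (tupT elements k).map (fun t => (path ++ [e]) ++ t)) :=
          foldl_app elements _ re
      _ = re ++ (tupT elements (k+1)).map (fun t => path ++ t) := by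
          simp [tupT, List.map_flatMap, Function.comp_def]

-- stepB commutes through tupT: appending a slot at the back of every DFS tuple is the next DFS level
theorem stepB_tupT (elements : List Int) :
    ∀ n, stepB elements (tupT elements n) = tupT elements (n + 1) := by
  intro n
  induction n with
  | zero =>
      simp only [stepB, tupT]
      induction elements with
      | nil => simp
      | cons x xs ihx => simp_all [List.flatMap_cons]
  | succ n ih =>
    show stepB elements (tupT elements (n+1)) = tupT elements (n+2)
    have h1 : stepB elements (tupT elements (n+1))
        = elements.flatMap (fun e => (stepB elements (tupT elements n)).map (fun t => e :: t)) := by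
      simp [stepB, tupT, List.flatMap_assoc, List.map_flatMap, List.flatMap_map, Function.comp_def]
    rw [h1, ih]
    simp [tupT]

theorem iter_stepB (elements : List Int) (l : List Int) :
    ∀ init, l.foldl (fun result _ => stepB elements result) init
      = (stepB elements)^[l.length] init := by
  induction l with
  | nil => intro init; simp
  | cons x xs ih =>
      intro init
      simp only [List.foldl_cons, List.length_cons, Function.iterate_succ_apply]
      exact ih (stepB elements init)

theorem iterate_tupT (elements : List Int) :
    ∀ n, (stepB elements)^[n] [[]] = tupT elements n := by
  intro n
  induction n with
  | zero => simp [tupT]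
  | succ n ih =>
    rw [Function.iterate_succ_apply', ih, stepB_tupT]

theorem gen_h_alt_eq (elements : List Int) (r : Int) :
    gen_h_alt elements r = tupT elements r.toNat := by
  unfold gen_h_alt
  have : (fun (result : List (List Int)) (_ : Int) =>
      result.flatMap (fun seq => elements.map (fun e => seq ++ [e])))
      = fun result _ => stepB elements result := rfl
  rw [this, iter_stepB, PySem.List.length_pyRange_one, iterate_tupT]
  simp

-- ===== VERDICT (by name: the statement is the Claim_ definition above) =====
theorem gen_h_spec : Claim_equal_gen_h := by
  intro elements r _ hpre
  unfold Spec_gen_h gen_h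
  rw [gen_h_alt_eq elements r]
  rw [dfsA_eq elements r r.toNat [] [] (by simpa using Int.toNat_of_nonneg hpre)]
  simp
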